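-- pv_equiv track=rewrite | github.com/jasperpaalman/JADS-2D-pose-estimation | models/features.py | get_plottables
-- ===== SOURCE A (Python) =====
-- def get_plottables(period_person_division, running_person_identifiers, running_fragments, turning_fragments):
--     """
--     Function to construct all plottable files. In principle to be used for visualisation.
--
--     :param period_person_division: Data strucure containing per frame all persons and their corresponding
--                                    coordinates
--     :param running_person_identifiers: The indices of identified 'people' that belong to the running person
--     :param running_fragments: The estimated fragments where the person under observation is running
--     :param turning_fragments: The estimated fragments where the person under observation is turning
--
--     :return: Plottable information for each distinct part in a fragment. The data structury is similar
--              to the person_period_division since it gives a data structure containing per person all frames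
--              and the coordinates of that person in that frame.
--     """
--
--     period_running_person_division = {period: {person: coords
--                                                for person, coords in period_dictionary.items() if
--                                                person in running_person_identifiers}
--                                       for period, period_dictionary in period_person_division.items()}
--
--     running_plottables = {
--         period: {person: coords for person, coords in period_dictionary.items() if
--                  person in running_person_identifiers}
--         for period, period_dictionary in period_person_division.items() if
--         any(lower <= period <= upper for (lower, upper) in running_fragments)}
--
--     turning_plottables = {
--         period: {person: coords for person, coords in period_dictionary.items() if
--                  person in running_person_identifiers}
--         for period, period_dictionary in period_person_division.items() if
--         any(lower <= period <= upper for (lower, upper) in turning_fragments)}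
--
--     period_running_person_division = dict(filter(lambda x: x[1] != {}, period_running_person_division.items()))
--     running_plottables = dict(filter(lambda x: x[1] != {}, running_plottables.items()))
--     turning_plottables = dict(filter(lambda x: x[1] != {}, turning_plottables.items()))
--
--     return period_running_person_division, running_plottables, turning_plottables
-- ===== SOURCE B (Python) =====
-- def get_plottables(period_person_division, running_person_identifiers, running_fragments, turning_fragments):
--     """Build the person-filtered table once, then derive the fragment dicts from it."""
--     def in_any(fragments, period):
--         return any(lower <= period <= upper for (lower, upper) in fragments)
--
--     period_running_person_division = {}
--     for period, period_dictionary in period_person_division.items():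
--         filtered = {person: coords for person, coords in period_dictionary.items()
--                     if person in running_person_identifiers}
--         if filtered:
--             period_running_person_division[period] = filtered
--
--     running_plottables = {period: d for period, d in period_running_person_division.items()
--                           if in_any(running_fragments, period)}
--     turning_plottables = {period: d for period, d in period_running_person_division.items()
--                           if in_any(turning_fragments, period)}
--
--     return period_running_person_division, running_plottables, turning_plottables
-- ===== Notes on version B (the rewrite author's own statement) =====
-- stated objective: simpler
-- what changed: B computes the person-filtered, empty-dropped table in a single pass and then derives the running/turning dicts by filtering that table on the fragment intervals, instead of A's three independent full comprehensions over the input followed by three empty-dict filter passes.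
import Mathlib
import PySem

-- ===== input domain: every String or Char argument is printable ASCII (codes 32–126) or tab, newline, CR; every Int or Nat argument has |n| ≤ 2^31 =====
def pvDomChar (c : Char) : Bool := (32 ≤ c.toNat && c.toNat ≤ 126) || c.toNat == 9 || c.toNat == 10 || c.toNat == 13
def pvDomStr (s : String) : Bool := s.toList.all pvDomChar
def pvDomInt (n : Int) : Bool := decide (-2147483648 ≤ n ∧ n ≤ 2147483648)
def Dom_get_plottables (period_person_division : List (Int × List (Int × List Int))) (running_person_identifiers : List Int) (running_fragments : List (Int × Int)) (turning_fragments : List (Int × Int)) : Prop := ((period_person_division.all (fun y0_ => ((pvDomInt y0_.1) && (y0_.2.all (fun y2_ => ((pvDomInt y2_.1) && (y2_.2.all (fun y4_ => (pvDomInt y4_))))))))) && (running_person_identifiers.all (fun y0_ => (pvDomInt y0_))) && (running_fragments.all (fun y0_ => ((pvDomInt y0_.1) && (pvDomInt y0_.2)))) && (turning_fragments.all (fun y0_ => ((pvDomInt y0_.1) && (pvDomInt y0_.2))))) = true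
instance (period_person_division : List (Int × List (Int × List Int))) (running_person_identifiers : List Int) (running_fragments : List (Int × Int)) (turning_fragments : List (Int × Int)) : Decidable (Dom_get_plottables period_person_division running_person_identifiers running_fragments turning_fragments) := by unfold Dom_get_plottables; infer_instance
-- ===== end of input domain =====

-- B builds the person-filtered, empty-dropped table once and derives both fragment dicts from it
-- instead of A's three independent comprehensions over the input plus three empty-filter passes (objective: simpler).
-- ===== PORT A =====
-- {person: coords for person, coords in d.items() if person in running_person_identifiers}
def pvFilterPersons (running_person_identifiers : List Int) (d : List (Int × List Int)) : List (Int × List Int) :=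
  d.filter (fun pc => running_person_identifiers.contains pc.1)

-- any(lower <= period <= upper for (lower, upper) in fragments)
def pvInAnyFrag (fragments : List (Int × Int)) (period : Int) : Bool :=
  fragments.any (fun lu => decide (lu.1 ≤ period ∧ period ≤ lu.2))

def get_plottables (period_person_division : List (Int × List (Int × List Int))) (running_person_identifiers : List Int) (running_fragments : List (Int × Int)) (turning_fragments : List (Int × Int)) : (List (Int × List (Int × List Int))) × (List (Int × List (Int × List Int))) × (List (Int × List (Int × List Int))) :=
  let period_running_person_division :=
    period_person_division.map (fun pd => (pd.1, pvFilterPersons running_person_identifiers pd.2))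
  let running_plottables :=
    (period_person_division.filter (fun pd => pvInAnyFrag running_fragments pd.1)).map
      (fun pd => (pd.1, pvFilterPersons running_person_identifiers pd.2))
  let turning_plottables :=
    (period_person_division.filter (fun pd => pvInAnyFrag turning_fragments pd.1)).map
      (fun pd => (pd.1, pvFilterPersons running_person_identifiers pd.2))
  let period_running_person_division := period_running_person_division.filter (fun x => !x.2.isEmpty)
  let running_plottables := running_plottables.filter (fun x => !x.2.isEmpty)
  let turning_plottables := turning_plottables.filter (fun x => !x.2.isEmpty)
  (period_running_person_division, running_plottables, turning_plottables)

-- ===== PORT B =====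
-- the single pass building the filtered, empty-dropped table (B's explicit loop)
def pvBuildTable (running_person_identifiers : List Int) : List (Int × List (Int × List Int)) → List (Int × List (Int × List Int))
  | [] => []
  | pd :: rest =>
    let filtered := pd.2.filter (fun pc => running_person_identifiers.contains pc.1)
    if filtered.isEmpty then pvBuildTable running_person_identifiers rest
    else (pd.1, filtered) :: pvBuildTable running_person_identifiers rest

def pvInAnyFragB (fragments : List (Int × Int)) (period : Int) : Bool :=
  fragments.any (fun lu => decide (lu.1 ≤ period ∧ period ≤ lu.2))

def get_plottables_alt (period_person_division : List (Int × List (Int × List Int))) (running_person_identifiers : List Int) (running_fragments : List (Int × Int)) (turning_fragments : List (Int × Int)) : (List (Int × List (Int × List Int))) × (List (Int × List (Int × List Int))) × (List (Int × List (Int × List Int))) :=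
  let table := pvBuildTable running_person_identifiers period_person_division
  let running_plottables := table.filter (fun pd => pvInAnyFragB running_fragments pd.1)
  let turning_plottables := table.filter (fun pd => pvInAnyFragB turning_fragments pd.1)
  (table, running_plottables, turning_plottables)

-- ===== PRECONDITION & SPEC =====
def Spec_get_plottables (period_person_division : List (Int × List (Int × List Int))) (running_person_identifiers : List Int) (running_fragments : List (Int × Int)) (turning_fragments : List (Int × Int)) (out : (List (Int × List (Int × List Int))) × (List (Int × List (Int × List Int))) × (List (Int × List (Int × List Int)))) : Prop := out = get_plottables_alt period_person_division running_person_identifiers running_fragments turning_fragments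
instance (period_person_division : List (Int × List (Int × List Int))) (running_person_identifiers : List Int) (running_fragments : List (Int × Int)) (turning_fragments : List (Int × Int)) (out : (List (Int × List (Int × List Int))) × (List (Int × List (Int × List Int))) × (List (Int × List (Int × List Int)))) : Decidable (Spec_get_plottables period_person_division running_person_identifiers running_fragments turning_fragments out) := by unfold Spec_get_plottables; exact @instDecidableEqProd _ _ inferInstance (@instDecidableEqProd _ _ inferInstance inferInstance) _ _

-- ===== CLAIM (what is proved, stated in full; the proofs are below) =====
def Claim_equal_get_plottables : Prop := ∀ (period_person_division : List (Int × List (Int × List Int))) (running_person_identifiers : List Int) (running_fragments : List (Int × Int)) (turning_fragments : List (Int × Int)), Dom_get_plottables period_person_division running_person_identifiers running_fragments turning_fragments → Spec_get_plottables period_person_division running_person_identifiers running_fragments turning_fragments (get_plottables period_person_division running_person_identifiers running_fragments turning_fragments)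

-- ===== LEMMAS AND PROOFS =====

-- B's one-pass table equals A's map-then-drop-empties pipeline.
theorem pvBuildTable_eq (rpi : List Int) (l : List (Int × List (Int × List Int))) :
    pvBuildTable rpi l
      = (l.map (fun pd => (pd.1, pvFilterPersons rpi pd.2))).filter (fun x => !x.2.isEmpty) := by
  induction l with
  | nil => rfl
  | cons pd rest ih =>
    simp only [pvBuildTable, pvFilterPersons, List.map_cons, List.filter_cons]
    cases (pd.2.filter (fun pc => rpi.contains pc.1)).isEmpty <;>
      simp [pvFilterPersons, ih]

-- A's filter-by-fragment, map, drop-empties equals B's fragment filter of the table.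
theorem pvFrag_eq (rpi : List Int) (frags : List (Int × Int))
    (l : List (Int × List (Int × List Int))) :
    ((l.filter (fun pd => pvInAnyFrag frags pd.1)).map
        (fun pd => (pd.1, pvFilterPersons rpi pd.2))).filter (fun x => !x.2.isEmpty)
      = (pvBuildTable rpi l).filter (fun pd => pvInAnyFragB frags pd.1) := by
  rw [pvBuildTable_eq]
  have h1 : (l.filter (fun pd => pvInAnyFrag frags pd.1)).map
        (fun pd => (pd.1, pvFilterPersons rpi pd.2))
      = (l.map (fun pd => (pd.1, pvFilterPersons rpi pd.2))).filter
          (fun x => pvInAnyFragB frags x.1) := by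
    rw [List.filter_map]
    rfl
  rw [h1, List.filter_filter, List.filter_filter]
  exact List.filter_congr (fun a _ => Bool.and_comm _ _)
-- ===== VERDICT (by name: the statement is the Claim_ definition above) =====
theorem get_plottables_spec : Claim_equal_get_plottables := by
  intro ppd rpi rf tf _
  show get_plottables ppd rpi rf tf = get_plottables_alt ppd rpi rf tf
  simp only [get_plottables, get_plottables_alt, pvBuildTable_eq, pvFrag_eq]
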